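-- pv_equiv track=rewrite | github.com/FaizKrisnadi/sustainability-gleif-matching-network | src/clean_names.py | strip_legal_suffixes
-- ===== SOURCE A (Python) =====
-- from typing import List, Sequence, Tuple
--
-- LEGAL_SUFFIX_PATTERNS: List[Tuple[str, ...]] = [
--     ("inc",),
--     ("incorporated",),
--     ("corp",),
--     ("corporation",),
--     ("co",),
--     ("company",),
--     ("ltd",),
--     ("limited",),
--     ("llc",),
--     ("plc",),
--     ("lp",),
--     ("llp",),
--     ("gmbh",),
--     ("ag",),
--     ("nv",),
--     ("bv",),
--     ("sa",),
--     ("spa",),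
--     ("pte",),
--     ("pt",),
--     ("tbk",),
--     ("s", "a"),
--     ("s", "p", "a"),
-- ]
--
-- def strip_legal_suffixes(clean_text: str) -> str:
--     if not clean_text:
--         return ""
--
--     tokens = clean_text.split()
--     changed = True
--
--     # Some jurisdictions place legal form markers as a leading token (for example, "PT").
--     # Remove only a small, explicit set to avoid over-stripping.
--     while tokens and tokens[0] in {"pt"}:
--         tokens = tokens[1:]
--
--     # Repeatedly remove recognized legal suffix token patterns at the end.
--     while changed and tokens:
--         changed = False
--         for suffix in sorted(LEGAL_SUFFIX_PATTERNS, key=len, reverse=True):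
--             s_len = len(suffix)
--             if s_len <= len(tokens) and tuple(tokens[-s_len:]) == suffix:
--                 tokens = tokens[:-s_len]
--                 changed = True
--                 break
--
--     return " ".join(tokens).strip()
-- ===== SOURCE B (Python) =====
-- from typing import List, Tuple
--
-- LEGAL_SUFFIX_PATTERNS: List[Tuple[str, ...]] = [
--     ("inc",), ("incorporated",), ("corp",), ("corporation",), ("co",),
--     ("company",), ("ltd",), ("limited",), ("llc",), ("plc",), ("lp",),
--     ("llp",), ("gmbh",), ("ag",), ("nv",), ("bv",), ("sa",), ("spa",),
--     ("pte",), ("pt",), ("tbk",),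
--     ("s", "a"), ("s", "p", "a"),
-- ]
--
-- SINGLE_TOKEN_SUFFIXES = frozenset(p[0] for p in LEGAL_SUFFIX_PATTERNS if len(p) == 1)
--
--
-- def strip_legal_suffixes(clean_text: str) -> str:
--     # Dynamic programming instead of the iterated greedy rewriting loop:
--     # ok[i] says whether tokens[i:] decomposes entirely into legal-suffix
--     # patterns; the answer is the prefix before the first decomposable suffix.
--     # This is correct because pattern peeling from the end is deterministic
--     # (no two patterns match the same tail), so the greedy loop removes
--     # exactly the longest decomposable suffix.
--     tokens = clean_text.split()
--     while tokens and tokens[0] == "pt":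
--         tokens = tokens[1:]
--     n = len(tokens)
--     ok = [False] * n + [True]
--     for i in range(n - 1, -1, -1):
--         t = tokens[i]
--         ok[i] = ((t in SINGLE_TOKEN_SUFFIXES and ok[i + 1])
--                  or (t == "s" and tokens[i + 1:i + 2] == ["a"] and ok[i + 2])
--                  or (t == "s" and tokens[i + 1:i + 3] == ["p", "a"] and ok[i + 3]))
--     cut = ok.index(True)
--     return " ".join(tokens[:cut])
-- ===== Notes on version B (the rewrite author's own statement) =====
-- stated objective: alternative
-- what changed: Replaces A's while-changed greedy rewriting loop (re-sorting the pattern list and tail-slicing the token list on every pass) with a single right-to-left dynamic-programming table recording for each index whether the token suffix starting there decomposes entirely into legal-suffix patterns, then one cut at the first decomposable suffix; correct since pattern peeling from the end is deterministic, so the greedy loop strips exactly the longest decomposable suffix.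
import Mathlib
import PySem

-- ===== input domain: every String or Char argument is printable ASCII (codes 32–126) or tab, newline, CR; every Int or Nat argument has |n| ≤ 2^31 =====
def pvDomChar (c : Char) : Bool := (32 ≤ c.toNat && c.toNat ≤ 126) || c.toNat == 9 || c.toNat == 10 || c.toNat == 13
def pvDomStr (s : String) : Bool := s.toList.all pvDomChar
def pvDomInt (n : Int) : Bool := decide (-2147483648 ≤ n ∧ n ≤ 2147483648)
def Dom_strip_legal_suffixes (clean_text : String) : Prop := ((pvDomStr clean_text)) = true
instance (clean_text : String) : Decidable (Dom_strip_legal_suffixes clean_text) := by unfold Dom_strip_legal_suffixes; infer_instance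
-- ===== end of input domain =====

-- B replaces A's while-changed greedy suffix-rewriting loop by one right-to-left DP table
-- ("does tokens[i:] decompose into suffix patterns?") plus a single cut; return values are equal.

-- ===== PORT A =====
def LEGAL_SUFFIX_PATTERNS : List (List String) :=
  [["inc"], ["incorporated"], ["corp"], ["corporation"], ["co"], ["company"],
   ["ltd"], ["limited"], ["llc"], ["plc"], ["lp"], ["llp"], ["gmbh"], ["ag"],
   ["nv"], ["bv"], ["sa"], ["spa"], ["pte"], ["pt"], ["tbk"],
   ["s", "a"], ["s", "p", "a"]]

-- `while tokens and tokens[0] in {"pt"}: tokens = tokens[1:]`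
def dropLeadingPt : List String → List String
  | [] => []
  | t :: rest => if t ∈ PySem.Set.ofList ["pt"] then dropLeadingPt rest else t :: rest

-- the `for suffix in sorted(...)` body: first matching suffix pattern, returning tokens[:-s_len]
def findSuffix : List (List String) → List String → Option (List String)
  | [], _ => none
  | suffix :: rest, tokens =>
    let s_len := suffix.length
    if s_len ≤ tokens.length ∧ PySem.List.slice tokens (some (-(s_len : Int))) none = suffix then
      some (PySem.List.slice tokens none (some (-(s_len : Int))))
    else findSuffix rest tokens

-- termination helper for the `while changed` loop: a successful pass shortens tokens
theorem findSuffix_length_lt (ps : List (List String)) (tokens t' : List String)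
    (hne : ∀ p ∈ ps, p ≠ []) (h : findSuffix ps tokens = some t') :
    t'.length < tokens.length := by
  induction ps with
  | nil => simp [findSuffix] at h
  | cons p ps ih =>
    simp only [findSuffix] at h
    split at h
    · rename_i hc
      obtain ⟨hle, _⟩ := hc
      have hp : p ≠ [] := hne p (by simp)
      have hpos : 0 < p.length := List.length_pos_iff.mpr hp
      rw [PySem.List.slice_to_neg_natCast _ _ hpos] at h
      injection h with h
      have := congrArg List.length h
      simp at this
      omega
    · exact ih (fun q hq => hne q (by simp [hq])) h

-- `while changed and tokens:` — one matched pattern per pass, repeat until no match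
def loopA (tokens : List String) : List String :=
  if tokens = [] then tokens
  else
    match h : findSuffix (PySem.List.sorted LEGAL_SUFFIX_PATTERNS (fun p => (p.length : Int)) true) tokens with
    | none => tokens
    | some t' => loopA t'
termination_by tokens.length
decreasing_by exact findSuffix_length_lt _ _ _ (by decide) h

def strip_legal_suffixes (clean_text : String) : String :=
  if clean_text = "" then ""
  else PySem.Str.strip (PySem.Str.join " " (loopA (dropLeadingPt (PySem.Str.split₀ clean_text))))

-- ===== PORT B =====
def SINGLE_TOKEN_SUFFIXES : PySem.Set String :=
  PySem.Set.ofList ((LEGAL_SUFFIX_PATTERNS.filter (fun p => p.length == 1)).filterMap List.head?)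

-- `while tokens and tokens[0] == "pt": tokens = tokens[1:]`
def dropPtB : List String → List String
  | [] => []
  | t :: rest => if t == "pt" then dropPtB rest else t :: rest

-- the DP table of B, built right-to-left exactly as the `for i in range(n-1,-1,-1)` loop:
-- okTableB tokens = [ok[0], ..., ok[n]]; the entry for index i (the head for the suffix
-- starting at i) is B's formula with ok[i+1], ok[i+2], ok[i+3] read from the already-built
-- table and tokens[i+1:i+2] / tokens[i+1:i+3] the Python slices (in range whenever read)
def okTableB : List String → List Bool
  | [] => [true]
  | t :: rest =>
    let tbl := okTableB rest
    (((t ∈ SINGLE_TOKEN_SUFFIXES) && tbl.getD 0 false)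
      || ((t == "s") && (PySem.List.slice rest none (some 1) == ["a"]) && tbl.getD 1 false)
      || ((t == "s") && (PySem.List.slice rest none (some 2) == ["p", "a"]) && tbl.getD 2 false)) :: tbl

def strip_legal_suffixes_alt (clean_text : String) : String :=
  let tokens := dropPtB (PySem.Str.split₀ clean_text)
  let ok := okTableB tokens
  -- `cut = ok.index(True)`: True is always in the table (its last entry), so idxOf is exact here
  let cut := ok.idxOf true
  PySem.Str.join " " (PySem.List.slice tokens none (some (cut : Int)))

-- ===== PRECONDITION & SPEC =====
def Spec_strip_legal_suffixes (clean_text : String) (out : String) : Prop := out = strip_legal_suffixes_alt clean_text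
instance (clean_text : String) (out : String) : Decidable (Spec_strip_legal_suffixes clean_text out) := by unfold Spec_strip_legal_suffixes; infer_instance

-- ===== CLAIM (what is proved, stated in full; the proofs are below) =====
def Claim_equal_strip_legal_suffixes : Prop := ∀ (clean_text : String), Dom_strip_legal_suffixes clean_text → Spec_strip_legal_suffixes clean_text (strip_legal_suffixes clean_text)

-- ===== LEMMAS AND PROOFS =====

theorem dropLeadingPt_eq_dropPtB (l : List String) : dropLeadingPt l = dropPtB l := by
  induction l with
  | nil => rfl
  | cons t rest ih =>
    simp only [dropLeadingPt, dropPtB, PySem.Set.mem_ofList, List.mem_singleton, beq_iff_eq]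
    split_ifs with h h2 h2 <;> simp_all

def singlesList : List String :=
  ["inc", "incorporated", "corp", "corporation", "co", "company", "ltd", "limited",
   "llc", "plc", "lp", "llp", "gmbh", "ag", "nv", "bv", "sa", "spa", "pte", "pt", "tbk"]

theorem sortedPatterns_eq :
    PySem.List.sorted LEGAL_SUFFIX_PATTERNS (fun p => (p.length : Int)) true
      = ["s", "p", "a"] :: ["s", "a"] :: singlesList.map (fun x => [x]) := by
  decide

-- proof-side bridge between the two programs: the forced peeling of one pattern at a time
-- from the REVERSED token list (at most one pattern ever matches a given prefix)
def stripRevB : List String → List String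
  | "a" :: "p" :: "s" :: rest => stripRevB rest
  | "a" :: "s" :: rest => stripRevB rest
  | t :: rest => if t ∈ SINGLE_TOKEN_SUFFIXES then stripRevB rest else t :: rest
  | [] => []

-- one pattern check of A, read on the reversed token list
theorem cond_iff (p tokens : List String) (hp : 0 < p.length) :
    (p.length ≤ tokens.length ∧ PySem.List.slice tokens (some (-(p.length : Int))) none = p)
      ↔ tokens.reverse.take p.length = p.reverse := by
  rw [PySem.List.slice_from_neg_natCast _ _ hp]
  constructor
  · rintro ⟨hle, hdrop⟩
    rw [List.take_reverse, hdrop]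
  · intro h
    have hlen : p.length ≤ tokens.length := by
      have := congrArg List.length h
      simp at this
      omega
    refine ⟨hlen, ?_⟩
    have := congrArg List.reverse h
    rw [List.take_reverse, List.reverse_reverse, List.reverse_reverse] at this
    exact this

theorem result_eq (p tokens : List String) (hp : 0 < p.length) :
    PySem.List.slice tokens none (some (-(p.length : Int))) = (tokens.reverse.drop p.length).reverse := by
  rw [PySem.List.slice_to_neg_natCast _ _ hp, List.drop_reverse, List.reverse_reverse]

theorem findSingles (xs : List String) (tokens : List String) (t : String) (rest : List String)
    (h : tokens.reverse = t :: rest) :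
    findSuffix (xs.map (fun x => [x])) tokens
      = if t ∈ xs then some rest.reverse else none := by
  induction xs with
  | nil => simp [findSuffix]
  | cons x xs ih =>
    simp only [List.map_cons, findSuffix]
    rw [if_congr (cond_iff [x] tokens (by simp)) rfl rfl]
    rw [h]
    by_cases hx : t = x
    · subst hx
      have hr := result_eq [t] tokens (by simp)
      norm_num at hr ⊢
      have htok : tokens = (t :: rest).reverse := by rw [← h, List.reverse_reverse]
      subst htok
      simp at hr ⊢
      simp [hr]
    · simp only [List.take_cons, List.take_zero, List.reverse_singleton, List.cons.injEq,
        and_true]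
      rw [if_neg (by simp [hx])]
      rw [ih]
      simp [hx]

theorem findSuffix_char (tokens : List String) :
    findSuffix (PySem.List.sorted LEGAL_SUFFIX_PATTERNS (fun p => (p.length : Int)) true) tokens
      = if tokens.reverse.take 3 = ["a", "p", "s"] then some ((tokens.reverse.drop 3).reverse)
        else if tokens.reverse.take 2 = ["a", "s"] then some ((tokens.reverse.drop 2).reverse)
        else match tokens.reverse with
          | [] => none
          | t :: rest => if t ∈ singlesList then some rest.reverse else none := by
  rw [sortedPatterns_eq]
  simp only [findSuffix]
  rw [if_congr (cond_iff ["s", "p", "a"] tokens (by simp)) rfl rfl]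
  rw [if_congr (cond_iff ["s", "a"] tokens (by simp)) rfl rfl]
  norm_num
  have h3 := result_eq ["s", "p", "a"] tokens (by simp)
  have h2 := result_eq ["s", "a"] tokens (by simp)
  norm_num at h3 h2
  by_cases c3 : tokens.reverse.take 3 = ["a", "p", "s"]
  · rw [if_pos c3, if_pos c3, h3]
  · rw [if_neg c3, if_neg c3]
    by_cases c2 : tokens.reverse.take 2 = ["a", "s"]
    · rw [if_pos c2, if_pos c2, h2]
    · rw [if_neg c2, if_neg c2]
      match hrev : tokens.reverse with
      | [] =>
        have : tokens = [] := by simpa using congrArg List.reverse hrev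
        subst this
        decide
      | t :: rest => exact findSingles singlesList tokens t rest hrev

theorem notake3 (t : String) (rest : List String)
    (hA : ∀ r', t = "a" → rest = "p" :: "s" :: r' → False) :
    ¬(t :: rest).take 3 = ["a", "p", "s"] := by
  intro h
  simp only [List.take_succ_cons, List.cons.injEq] at h
  obtain ⟨rfl, h⟩ := h
  have hd := List.take_append_drop 2 rest
  rw [h] at hd
  exact hA (rest.drop 2) rfl hd.symm

theorem notake2 (t : String) (rest : List String)
    (hB : ∀ r', t = "a" → rest = "s" :: r' → False) :
    ¬(t :: rest).take 2 = ["a", "s"] := by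
  intro h
  simp only [List.take_succ_cons, List.cons.injEq] at h
  obtain ⟨rfl, h⟩ := h
  have hd := List.take_append_drop 1 rest
  rw [h] at hd
  exact hB (rest.drop 1) rfl hd.symm

theorem stripRevB_char (r : List String) :
    stripRevB r
      = if r.take 3 = ["a", "p", "s"] then stripRevB (r.drop 3)
        else if r.take 2 = ["a", "s"] then stripRevB (r.drop 2)
        else match r with
          | [] => []
          | t :: rest => if t ∈ singlesList then stripRevB rest else t :: rest := by
  conv_lhs => rw [stripRevB.eq_def]
  split
  · rename_i rest
    rw [if_pos (by simp)]
    simp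
  · rename_i rest
    rw [if_neg (by simp), if_pos (by simp)]
    simp
  · rename_i t rest hA hB
    rw [if_neg (notake3 t rest hA), if_neg (notake2 t rest hB)]
    have hmem : (t ∈ SINGLE_TOKEN_SUFFIXES) ↔ t ∈ singlesList := by
      rw [show SINGLE_TOKEN_SUFFIXES = PySem.Set.ofList singlesList from rfl]
      exact PySem.Set.mem_ofList _ _
    simp [hmem]
  · rw [if_neg (by simp), if_neg (by simp)]

theorem loopA_eq_stripRevB (n : Nat) : ∀ tokens : List String, tokens.length ≤ n →
    loopA tokens = (stripRevB tokens.reverse).reverse := by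
  induction n with
  | zero =>
    intro tokens hlen
    have : tokens = [] := by cases tokens <;> simp_all
    subst this
    simp [loopA, stripRevB]
  | succ n ih =>
    intro tokens hlen
    by_cases h0 : tokens = []
    · subst h0
      simp [loopA, stripRevB]
    · rw [stripRevB_char tokens.reverse, loopA.eq_def, if_neg h0]
      split
      · rename_i hnone
        rw [findSuffix_char] at hnone
        split_ifs at hnone with c3 c2
        · rw [if_neg c3, if_neg c2]
          cases hrev : tokens.reverse with
          | nil =>
            exact absurd (by simpa using congrArg List.reverse hrev) h0
          | cons t rest =>
            rw [hrev] at hnone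
            simp only at hnone
            split_ifs at hnone with hs
            simp [hs]
            rw [← List.reverse_cons, ← hrev, List.reverse_reverse]
      · rename_i t' hsome
        rw [findSuffix_char] at hsome
        split_ifs at hsome with c3 c2
        · injection hsome with hsome
          subst hsome
          rw [if_pos c3]
          have hr3 : 3 ≤ tokens.length := by
            have := congrArg List.length c3
            simp at this
            omega
          rw [ih ((tokens.reverse.drop 3).reverse)
            (by simp only [List.length_reverse, List.length_drop]; omega)]
          rw [List.reverse_reverse]
        · injection hsome with hsome
          subst hsome
          rw [if_neg c3, if_pos c2]
          have hr2 : 2 ≤ tokens.length := by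
            have := congrArg List.length c2
            simp at this
            omega
          rw [ih ((tokens.reverse.drop 2).reverse)
            (by simp only [List.length_reverse, List.length_drop]; omega)]
          rw [List.reverse_reverse]
        · rw [if_neg c3, if_neg c2]
          cases hrev : tokens.reverse with
          | nil =>
            exact absurd (by simpa using congrArg List.reverse hrev) h0
          | cons t rest =>
            rw [hrev] at hsome
            simp only at hsome
            split_ifs at hsome with hs
            · injection hsome with hsome
              subst hsome
              simp only [hs, if_pos]
              have hlr : rest.length + 1 = tokens.length := by
                have := congrArg List.length hrev
                simpa using this.symm
              rw [ih (rest.reverse) (by simp; omega)]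
              rw [List.reverse_reverse]

-- ===== the DP side: decomposability into suffix patterns =====

-- okB l : "l decomposes entirely into legal-suffix patterns" (the meaning of an ok-table entry)
def okB : List String → Bool
  | [] => true
  | t :: rest =>
    ((t ∈ SINGLE_TOKEN_SUFFIXES) && okB rest)
      || ((t == "s") && (rest.take 1 == ["a"]) && okB (rest.drop 1))
      || ((t == "s") && (rest.take 2 == ["p", "a"]) && okB (rest.drop 2))
termination_by l => l.length
decreasing_by all_goals first | (simp; omega) | simp | omega

theorem okTableB_getD (l : List String) : ∀ k : Nat,
    (okTableB l).getD k false = if k ≤ l.length then okB (l.drop k) else false := by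
  induction l with
  | nil => intro k; cases k <;> simp [okTableB, okB]
  | cons t rest ih =>
    intro k
    cases k with
    | zero =>
      simp only [okTableB, List.getD_cons_zero, Nat.zero_le, if_pos, List.drop_zero]
      rw [okB]
      rw [ih 0, ih 1, ih 2]
      simp only [List.drop_zero, Nat.zero_le, if_pos]
      have e1 : PySem.List.slice rest none (some 1) = rest.take 1 := by
        simpa using PySem.List.slice_to_natCast rest 1
      have e2 : PySem.List.slice rest none (some 2) = rest.take 2 := by
        simpa using PySem.List.slice_to_natCast rest 2
      rw [e1, e2]
      by_cases h1 : 1 ≤ rest.length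
      · rw [if_pos h1]
        by_cases h2 : 2 ≤ rest.length
        · rw [if_pos h2]
        · rw [if_neg h2]
          have : rest.take 2 ≠ ["p", "a"] := by
            intro h
            have := congrArg List.length h
            simp [List.length_take] at this
            omega
          simp [this]
      · rw [if_neg h1]
        have h0 : rest = [] := by
          cases rest with
          | nil => rfl
          | cons a b => simp at h1
        subst h0
        simp
    | succ k =>
      simp only [okTableB, List.getD_cons_succ, ih k, List.drop_succ_cons, List.length_cons,
        Nat.add_le_add_iff_right]

theorem okTableB_cons (t : String) (rest : List String) :
    okTableB (t :: rest) = okB (t :: rest) :: okTableB rest := by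
  have h := okTableB_getD (t :: rest) 0
  simp only [Nat.zero_le, if_pos, List.drop_zero] at h
  rw [okTableB] at h ⊢
  simp only [List.getD_cons_zero] at h
  rw [h]

theorem idxOf_okTableB (l : List String) : ∀ j : Nat, j ≤ l.length →
    okB (l.drop j) = true → (∀ i, i < j → okB (l.drop i) = false) →
    (okTableB l).idxOf true = j := by
  induction l with
  | nil =>
    intro j hj hok _
    have hj0 : j = 0 := Nat.le_zero.mp hj
    subst hj0
    simp [okTableB, List.idxOf]
  | cons t rest ih =>
    intro j hj hok hmin
    rw [okTableB_cons]
    cases j with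
    | zero =>
      simp only [List.drop_zero] at hok
      simp [List.idxOf_cons, hok]
    | succ j =>
      have h0 : okB (t :: rest) = false := by
        have := hmin 0 (Nat.succ_pos j)
        simpa using this
      rw [List.idxOf_cons, h0]
      simp only [List.drop_succ_cons] at hok
      have : (okTableB rest).idxOf true = j := by
        refine ih j (by simpa using hj) hok ?_
        intro i hi
        have := hmin (i + 1) (by omega)
        simpa using this
      simp [this]

-- decomposability as an inductive predicate, in token order and reversed
inductive Decomp : List String → Prop
  | nil : Decomp []
  | single (t : String) (r : List String) : t ∈ SINGLE_TOKEN_SUFFIXES → Decomp r → Decomp (t :: r)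
  | sa (r : List String) : Decomp r → Decomp ("s" :: "a" :: r)
  | spa (r : List String) : Decomp r → Decomp ("s" :: "p" :: "a" :: r)

inductive RDecomp : List String → Prop
  | nil : RDecomp []
  | single (t : String) (r : List String) : t ∈ SINGLE_TOKEN_SUFFIXES → RDecomp r → RDecomp (t :: r)
  | as (r : List String) : RDecomp r → RDecomp ("a" :: "s" :: r)
  | aps (r : List String) : RDecomp r → RDecomp ("a" :: "p" :: "s" :: r)

theorem okB_iff_decomp (l : List String) : okB l = true ↔ Decomp l := by
  constructor
  · intro h
    induction l using okB.induct with
    | case1 =>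
      exact Decomp.nil
    | case2 t rest ih1 ih2 ih3 =>
      rw [okB] at h
      simp only [Bool.or_eq_true, Bool.and_eq_true, beq_iff_eq, decide_eq_true_eq] at h
      rcases h with (⟨hm, hr⟩ | ⟨⟨hts, hta⟩, hr⟩) | ⟨⟨hts, htpa⟩, hr⟩
      · exact Decomp.single t rest hm (ih1 hr)
      · subst hts
        cases rest with
        | nil => simp at hta
        | cons a r' =>
          simp only [List.take_succ_cons, List.take_zero, List.cons.injEq, and_true] at hta
          subst hta
          simp only [List.drop_succ_cons, List.drop_zero] at hr
          exact Decomp.sa r' (ih2 hr)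
      · subst hts
        cases rest with
        | nil => simp at htpa
        | cons p r' =>
          cases r' with
          | nil => simp at htpa
          | cons a r'' =>
            simp only [List.take_succ_cons, List.take_zero, List.cons.injEq, and_true] at htpa
            obtain ⟨rfl, rfl⟩ := htpa
            simp only [List.drop_succ_cons, List.drop_zero] at hr
            exact Decomp.spa r'' (ih3 hr)
  · intro h
    induction h with
    | nil => simp [okB]
    | single t r hm _ ih => rw [okB]; simp [hm, ih]
    | sa r _ ih => rw [okB]; simp [ih]
    | spa r _ ih => rw [okB]; simp [ih]

theorem rdecomp_append (r q : List String) (hr : RDecomp r) (hq : RDecomp q) :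
    RDecomp (r ++ q) := by
  induction hr with
  | nil => simpa using hq
  | single t r hm _ ih => exact RDecomp.single t _ hm ih
  | as r _ ih => exact RDecomp.as _ ih
  | aps r _ ih => exact RDecomp.aps _ ih

theorem decomp_append (r q : List String) (hr : Decomp r) (hq : Decomp q) :
    Decomp (r ++ q) := by
  induction hr with
  | nil => simpa using hq
  | single t r hm _ ih => exact Decomp.single t _ hm ih
  | sa r _ ih => exact Decomp.sa _ ih
  | spa r _ ih => exact Decomp.spa _ ih

theorem decomp_reverse (l : List String) (h : Decomp l) : RDecomp l.reverse := by
  induction h with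
  | nil => exact RDecomp.nil
  | single t r hm _ ih =>
    rw [List.reverse_cons]
    exact rdecomp_append _ _ ih (RDecomp.single t [] hm RDecomp.nil)
  | sa r _ ih =>
    rw [show ("s" :: "a" :: r).reverse = r.reverse ++ ["a", "s"] by simp]
    exact rdecomp_append _ _ ih (RDecomp.as [] RDecomp.nil)
  | spa r _ ih =>
    rw [show ("s" :: "p" :: "a" :: r).reverse = r.reverse ++ ["a", "p", "s"] by simp]
    exact rdecomp_append _ _ ih (RDecomp.aps [] RDecomp.nil)

theorem rdecomp_reverse (l : List String) (h : RDecomp l) : Decomp l.reverse := by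
  induction h with
  | nil => exact Decomp.nil
  | single t r hm _ ih =>
    rw [List.reverse_cons]
    exact decomp_append _ _ ih (Decomp.single t [] hm Decomp.nil)
  | as r _ ih =>
    rw [show ("a" :: "s" :: r).reverse = r.reverse ++ ["s", "a"] by simp]
    exact decomp_append _ _ ih (Decomp.sa [] Decomp.nil)
  | aps r _ ih =>
    rw [show ("a" :: "p" :: "s" :: r).reverse = r.reverse ++ ["s", "p", "a"] by simp]
    exact decomp_append _ _ ih (Decomp.spa [] Decomp.nil)

theorem stripRevB_cons (x : String) (rest : List String)
    (hA : ∀ r', x = "a" → rest = "p" :: "s" :: r' → False)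
    (hB : ∀ r', x = "a" → rest = "s" :: r' → False) :
    stripRevB (x :: rest) = if x ∈ SINGLE_TOKEN_SUFFIXES then stripRevB rest else x :: rest := by
  have hch := stripRevB_char (x :: rest)
  rw [if_neg (notake3 x rest hA), if_neg (notake2 x rest hB)] at hch
  simpa [show (x ∈ SINGLE_TOKEN_SUFFIXES) ↔ x ∈ singlesList from PySem.Set.mem_ofList _ _]
    using hch

theorem mem_singles_ne_a (t : String) (h : t ∈ SINGLE_TOKEN_SUFFIXES) : t ≠ "a" := by
  intro hta
  subst hta
  exact absurd h (by decide)

theorem stripRevB_length_le (r : List String) : (stripRevB r).length ≤ r.length := by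
  induction r using stripRevB.induct with
  | case1 rest ih => simp only [stripRevB]; simp; omega
  | case2 rest ih => simp only [stripRevB]; simp; omega
  | case3 t rest hA hB hs ih =>
    rw [stripRevB_cons t rest hA hB, if_pos hs]
    simp; omega
  | case4 t rest hA hB hs =>
    rw [stripRevB_cons t rest hA hB, if_neg hs]
  | case5 => simp [stripRevB]

theorem stripRevB_decomp (r : List String) :
    ∃ d, RDecomp d ∧ r = d ++ stripRevB r := by
  induction r using stripRevB.induct with
  | case1 rest ih =>
    obtain ⟨d, hd, hr⟩ := ih
    exact ⟨"a" :: "p" :: "s" :: d, RDecomp.aps d hd, by simp only [stripRevB]; simpa using hr⟩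
  | case2 rest ih =>
    obtain ⟨d, hd, hr⟩ := ih
    exact ⟨"a" :: "s" :: d, RDecomp.as d hd, by simp only [stripRevB]; simpa using hr⟩
  | case3 t rest hA hB hs ih =>
    obtain ⟨d, hd, hr⟩ := ih
    refine ⟨t :: d, RDecomp.single t d hs hd, ?_⟩
    rw [stripRevB_cons t rest hA hB, if_pos hs]
    simpa using hr
  | case4 t rest hA hB hs =>
    refine ⟨[], RDecomp.nil, ?_⟩
    rw [stripRevB_cons t rest hA hB, if_neg hs]
    simp
  | case5 => exact ⟨[], RDecomp.nil, rfl⟩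

theorem stripRevB_skip (d : List String) (hd : RDecomp d) :
    ∀ m, stripRevB (d ++ m) = stripRevB m := by
  induction hd with
  | nil => intro m; simp
  | single t r hm _ ih =>
    intro m
    have hta := mem_singles_ne_a t hm
    rw [List.cons_append, stripRevB_cons t (r ++ m)
      (fun r' h _ => hta h) (fun r' h _ => hta h), if_pos hm]
    exact ih m
  | as r _ ih =>
    intro m
    have hch := stripRevB_char ("a" :: "s" :: (r ++ m))
    rw [if_neg (by cases r ++ m <;> simp), if_pos (by simp)] at hch
    simpa [hch] using ih m
  | aps r _ ih =>
    intro m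
    have hch := stripRevB_char ("a" :: "p" :: "s" :: (r ++ m))
    rw [if_pos (by simp)] at hch
    simpa [hch] using ih m

-- the cut B computes is exactly the length of what A's loop keeps
theorem cut_eq (tokens : List String) :
    (okTableB tokens).idxOf true = (stripRevB tokens.reverse).length := by
  obtain ⟨d, hd, hsplit⟩ := stripRevB_decomp tokens.reverse
  set m := stripRevB tokens.reverse with hm
  have htok : tokens = m.reverse ++ d.reverse := by
    have := congrArg List.reverse hsplit
    simpa using this
  have hlen : m.length ≤ tokens.length := by
    have := stripRevB_length_le tokens.reverse
    simpa using this
  refine idxOf_okTableB tokens m.length hlen ?_ ?_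
  · have hdrop : tokens.drop m.length = d.reverse := by
      rw [htok, show m.length = m.reverse.length by simp]
      exact List.drop_left
    rw [hdrop]
    exact (okB_iff_decomp _).mpr (rdecomp_reverse d hd)
  · intro i hi
    by_contra hok
    rw [Bool.not_eq_false] at hok
    have hdec : Decomp (tokens.drop i) := (okB_iff_decomp _).mp hok
    have hrd : RDecomp (tokens.reverse.take (tokens.length - i)) := by
      have := decomp_reverse _ hdec
      rwa [show (tokens.drop i).reverse = tokens.reverse.take (tokens.length - i) by
        rw [List.take_reverse, show tokens.length - (tokens.length - i) = i by omega]] at this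
    have hsplit2 : tokens.reverse
        = tokens.reverse.take (tokens.length - i) ++ tokens.reverse.drop (tokens.length - i) :=
      (List.take_append_drop _ _).symm
    have hskip : m = stripRevB (tokens.reverse.drop (tokens.length - i)) := by
      rw [hm]
      conv_lhs => rw [hsplit2]
      exact stripRevB_skip _ hrd _
    have hle : m.length ≤ i := by
      calc m.length ≤ (tokens.reverse.drop (tokens.length - i)).length := by
            rw [hskip]; exact stripRevB_length_le _
        _ ≤ i := by
            have hdl : (tokens.reverse.drop (tokens.length - i)).length
                = tokens.reverse.length - (tokens.length - i) := List.length_drop ..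
            rw [hdl, List.length_reverse]
            omega
    omega

-- tokens produced by str.split() are nonempty and whitespace-free
theorem split₀_go_good (s : List Char) :
    ∀ (cur : List Char) (acc : List (List Char)),
    (∀ c ∈ cur, PySem.Chars.isspace c = false) →
    (∀ t ∈ acc, t ≠ [] ∧ ∀ c ∈ t, PySem.Chars.isspace c = false) →
    ∀ t ∈ PySem.Chars.split₀.go s cur acc, t ≠ [] ∧ ∀ c ∈ t, PySem.Chars.isspace c = false := by
  induction s with
  | nil =>
    intro cur acc hcur hacc t ht
    simp only [PySem.Chars.split₀.go] at ht
    split at ht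
    · exact hacc t (by simpa using ht)
    · rename_i hcur0
      rw [List.mem_reverse, List.mem_cons] at ht
      rcases ht with ht | ht
      · subst ht
        refine ⟨by simpa using (by simpa [List.isEmpty_iff] using hcur0 : cur ≠ []), ?_⟩
        intro c hc
        exact hcur c (by simpa using hc)
      · exact hacc t ht
  | cons c rest ih =>
    intro cur acc hcur hacc t ht
    simp only [PySem.Chars.split₀.go] at ht
    split at ht
    · split at ht
      · exact ih [] acc (by simp) hacc t ht
      · rename_i hcur0
        refine ih [] (cur.reverse :: acc) (by simp) ?_ t ht
        intro u hu
        rw [List.mem_cons] at hu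
        rcases hu with hu | hu
        · subst hu
          refine ⟨by simpa using (by simpa [List.isEmpty_iff] using hcur0 : cur ≠ []), ?_⟩
          intro d hd
          exact hcur d (by simpa using hd)
        · exact hacc u hu
    · rename_i hc
      refine ih (c :: cur) acc ?_ hacc t ht
      intro d hd
      rw [List.mem_cons] at hd
      rcases hd with hd | hd
      · subst hd; simpa using hc
      · exact hcur d hd

theorem split₀_good (s : List Char) :
    ∀ t ∈ PySem.Chars.split₀ s, t ≠ [] ∧ ∀ c ∈ t, PySem.Chars.isspace c = false := by
  exact split₀_go_good s [] [] (by simp) (by simp)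

theorem dropWhile_head_false {α : Type} (p : α → Bool) (l : List α) (c : α)
    (hh : l.head? = some c) (hc : p c = false) : List.dropWhile p l = l := by
  cases l with
  | nil => simp at hh
  | cons x xs =>
    rw [List.head?_cons, Option.some.injEq] at hh
    subst hh
    rw [List.dropWhile_cons, if_neg (by simp [hc])]

theorem join_head_last (t : List Char) (rest : List (List Char))
    (h : ∀ u ∈ t :: rest, u ≠ [] ∧ ∀ c ∈ u, PySem.Chars.isspace c = false) :
    ∃ c c', (PySem.Chars.join [' '] (t :: rest)).head? = some c ∧
      (PySem.Chars.join [' '] (t :: rest)).getLast? = some c' ∧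
      PySem.Chars.isspace c = false ∧ PySem.Chars.isspace c' = false := by
  induction rest generalizing t with
  | nil =>
    obtain ⟨hne, hsp⟩ := h t (by simp)
    refine ⟨t.head (by simpa using hne), t.getLast hne, ?_, ?_, ?_, ?_⟩
    · rw [PySem.Chars.join_singleton, List.head?_eq_head]
    · rw [PySem.Chars.join_singleton, List.getLast?_eq_getLast]
    · exact hsp _ (List.head_mem _)
    · exact hsp _ (List.getLast_mem _)
  | cons u rest ih =>
    obtain ⟨hne, hsp⟩ := h t (by simp)
    obtain ⟨c, c', _, hl, hcs, hcs'⟩ := ih u (fun v hv => h v (by simp [List.mem_cons] at hv ⊢; tauto))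
    refine ⟨t.head (by simpa using hne), c', ?_, ?_, ?_, hcs'⟩
    · rw [PySem.Chars.join_cons_cons, List.append_assoc, List.head?_append,
        List.head?_eq_head (by simpa using hne)]
      rfl
    · rw [PySem.Chars.join_cons_cons, List.getLast?_append, hl]
      rfl
    · exact hsp _ (List.head_mem _)

theorem strip_join_good (parts : List (List Char))
    (h : ∀ t ∈ parts, t ≠ [] ∧ ∀ c ∈ t, PySem.Chars.isspace c = false) :
    PySem.Chars.strip (PySem.Chars.join [' '] parts) = PySem.Chars.join [' '] parts := by
  cases hp : parts with
  | nil => simp [PySem.Chars.join_nil, PySem.Chars.strip, PySem.Chars.lstrip, PySem.Chars.rstrip]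
  | cons t rest =>
    subst hp
    obtain ⟨c, c', hh, hl, hcs, hcs'⟩ := join_head_last t rest h
    have hlstrip : PySem.Chars.lstrip (PySem.Chars.join [' '] (t :: rest)) = PySem.Chars.join [' '] (t :: rest) := by
      unfold PySem.Chars.lstrip
      exact dropWhile_head_false _ _ _ hh hcs
    have hrstrip : ∀ l : List Char, l.getLast? = some c' →
        PySem.Chars.rstrip l = l := by
      intro l hl'
      unfold PySem.Chars.rstrip
      rw [dropWhile_head_false _ _ c' (by rw [List.head?_reverse]; exact hl') hcs',
        List.reverse_reverse]
    unfold PySem.Chars.strip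
    rw [hlstrip, hrstrip _ hl]

theorem mem_dropPtB (l : List String) (t : String) (h : t ∈ dropPtB l) : t ∈ l := by
  induction l with
  | nil => simpa [dropPtB] using h
  | cons x rest ih =>
    simp only [dropPtB] at h
    split at h
    · exact List.mem_cons_of_mem _ (ih h)
    · exact h

theorem mem_stripRevB (r : List String) (t : String) (h : t ∈ stripRevB r) : t ∈ r := by
  induction r using stripRevB.induct with
  | case1 rest ih => simp only [stripRevB] at h; simp [ih h]
  | case2 rest ih => simp only [stripRevB] at h; simp [ih h]
  | case3 x rest hA hB hs ih =>
    rw [stripRevB_cons x rest hA hB, if_pos hs] at h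
    simp [ih h]
  | case4 x rest hA hB hs =>
    rw [stripRevB_cons x rest hA hB, if_neg hs] at h
    exact h
  | case5 => simp [stripRevB] at h

theorem goodX (ct : String) :
    ∀ u ∈ (stripRevB ((dropPtB (PySem.Str.split₀ ct)).reverse)).reverse.map String.toList,
      u ≠ [] ∧ ∀ c ∈ u, PySem.Chars.isspace c = false := by
  intro u hu
  rw [List.mem_map] at hu
  obtain ⟨t, ht, rfl⟩ := hu
  rw [List.mem_reverse] at ht
  have ht2 : t ∈ PySem.Str.split₀ ct := by
    have := mem_stripRevB _ _ ht
    rw [List.mem_reverse] at this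
    exact mem_dropPtB _ _ this
  have : t.toList ∈ PySem.Chars.split₀ ct.toList := by
    rw [← PySem.Str.split₀_map_toList]
    exact List.mem_map_of_mem ht2
  exact split₀_good ct.toList t.toList this

-- B's take-at-cut is exactly what A's loop keeps
theorem take_cut (tokens : List String) :
    tokens.take ((okTableB tokens).idxOf true) = (stripRevB tokens.reverse).reverse := by
  rw [cut_eq]
  obtain ⟨d, hd, hsplit⟩ := stripRevB_decomp tokens.reverse
  set m := stripRevB tokens.reverse with hm
  have htok : tokens = m.reverse ++ d.reverse := by
    have := congrArg List.reverse hsplit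
    simpa using this
  rw [htok, show m.length = m.reverse.length by simp]
  exact List.take_left

-- ===== VERDICT (by name: the statement is the Claim_ definition above) =====
theorem strip_legal_suffixes_spec : Claim_equal_strip_legal_suffixes := by
  unfold Claim_equal_strip_legal_suffixes Spec_strip_legal_suffixes
  intro ct _
  unfold strip_legal_suffixes strip_legal_suffixes_alt
  by_cases h0 : ct = ""
  · subst h0
    rfl
  · rw [if_neg h0, dropLeadingPt_eq_dropPtB,
      loopA_eq_stripRevB (dropPtB (PySem.Str.split₀ ct)).length _ le_rfl]
    simp only
    rw [PySem.List.slice_to_natCast, take_cut]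
    have hstrip :
        PySem.Chars.strip ((PySem.Str.join " "
          ((stripRevB ((dropPtB (PySem.Str.split₀ ct)).reverse)).reverse)).toList)
        = (PySem.Str.join " "
          ((stripRevB ((dropPtB (PySem.Str.split₀ ct)).reverse)).reverse)).toList := by
      rw [PySem.Str.toList_join]
      exact strip_join_good _ (goodX ct)
    unfold PySem.Str.strip
    rw [hstrip, String.ofList_toList]
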